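-- pv_equiv track=rewrite | github.com/dmehrotra/uber-ocr | ocr/parse_uber.py | try_order_u
-- ===== SOURCE A (Python) =====
-- def try_order_u(content):
-- 	line_index = None
-- 	for l in content:
-- 		if line_index == None:
-- 			if "uber receives" in l:
-- 				line_index = content.index(l)
-- 		else:
-- 			if "total" in l:
-- 				return l.split("total")[1].strip()
-- ===== SOURCE B (Python) =====
-- def try_order_u(content):
--     # Single backwards pass: walking right-to-left, `ans` holds the extracted
--     # value of the earliest 'total' line strictly to the right of the current
--     # position; each 'uber receives' line snapshots it, so after the pass
--     # `result` corresponds to the first marker line.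
--     ans = None
--     result = None
--     for l in reversed(content):
--         if "uber receives" in l:
--             result = ans
--         if "total" in l:
--             ans = l.split("total")[1].strip()
--     return result
-- ===== Notes on version B (the rewrite author's own statement) =====
-- stated objective: alternative
-- what changed: Replaces A's forward stateful scan (flag set via content.index, then return on the next 'total' line) by a single right-to-left pass with an accumulator that builds the answer back-to-front: it carries the earliest 'total' extraction to the right of the cursor and snapshots it at each 'uber receives' line, so the last snapshot belongs to the first marker.
import Mathlib
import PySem

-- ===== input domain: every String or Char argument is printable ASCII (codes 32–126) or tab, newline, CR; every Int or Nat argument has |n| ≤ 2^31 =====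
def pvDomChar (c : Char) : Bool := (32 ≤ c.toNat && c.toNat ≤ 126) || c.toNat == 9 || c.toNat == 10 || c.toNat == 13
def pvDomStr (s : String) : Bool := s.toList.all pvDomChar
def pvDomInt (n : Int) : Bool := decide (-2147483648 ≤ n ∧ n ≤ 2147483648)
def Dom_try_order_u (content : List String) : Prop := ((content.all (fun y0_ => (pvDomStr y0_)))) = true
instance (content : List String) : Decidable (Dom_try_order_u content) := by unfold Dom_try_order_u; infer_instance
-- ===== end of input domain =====

-- B replaces A's forward flag-scan by one reverse pass with an accumulator; no speed claim.

-- ===== PORT A =====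
-- port of `l.split("total")[1].strip()` (the identical expression occurs in both Pythons)
def pvExtractTotal (l : String) : String :=
  PySem.Str.strip ((((PySem.Str.split? l "total").getD []).getD 1 ""))

def pvLoopA (full : List String) : List String → Option Int → Option String
  | [], _ => none
  | l :: ls, li =>
    if li = none then
      if PySem.Str.isIn "uber receives" l then
        pvLoopA full ls ((PySem.List.index? full l).map (Int.ofNat))
      else pvLoopA full ls li
    else
      if PySem.Str.isIn "total" l then some (pvExtractTotal l)
      else pvLoopA full ls li

def try_order_u (content : List String) : Option String :=
  pvLoopA content content none

-- ===== PORT B =====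
-- one fold over the reversed list, state = (ans, result) as in Source B's loop
def try_order_u_alt (content : List String) : Option String :=
  (content.reverse.foldl
    (fun (st : Option String × Option String) l =>
      let result := if PySem.Str.isIn "uber receives" l then st.1 else st.2
      let ans := if PySem.Str.isIn "total" l then some (pvExtractTotal l) else st.1
      (ans, result))
    (none, none)).2

-- ===== PRECONDITION & SPEC =====
def Spec_try_order_u (content : List String) (out : Option String) : Prop := out = try_order_u_alt content
instance (content : List String) (out : Option String) : Decidable (Spec_try_order_u content out) := by unfold Spec_try_order_u; infer_instance

-- ===== CLAIM (what is proved, stated in full; the proofs are below) =====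
def Claim_equal_try_order_u : Prop := ∀ (content : List String), Dom_try_order_u content → Spec_try_order_u content (try_order_u content)

-- ===== LEMMAS AND PROOFS =====

-- proof-only reference functions: first-'total' extraction and the whole spec
def pvScanTotal : List String → Option String
  | [] => none
  | l :: ls => if PySem.Str.isIn "total" l then some (pvExtractTotal l) else pvScanTotal ls

def pvF : List String → Option String
  | [] => none
  | l :: ls => if PySem.Str.isIn "uber receives" l then pvScanTotal ls else pvF ls

def pvStep (st : Option String × Option String) (l : String) : Option String × Option String :=
  (if PySem.Str.isIn "total" l then some (pvExtractTotal l) else st.1,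
   if PySem.Str.isIn "uber receives" l then st.1 else st.2)

-- once A's flag is set its value is never read: the rest is the first-total scan
theorem pvLoopA_some (full rest : List String) (k : Int) :
    pvLoopA full rest (some k) = pvScanTotal rest := by
  induction rest with
  | nil => rfl
  | cons l ls ih =>
      simp only [pvLoopA, pvScanTotal, reduceCtorEq, if_false]
      by_cases h : PySem.Str.isIn "total" l = true
      · rw [if_pos h, if_pos h]
      · rw [if_neg h, if_neg h]; exact ih

-- A's loop with the flag unset computes pvF, provided every line occurs in `full`
theorem pvLoopA_none (full rest : List String) (hsub : ∀ l ∈ rest, l ∈ full) :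
    pvLoopA full rest none = pvF rest := by
  induction rest with
  | nil => rfl
  | cons l ls ih =>
      have hmem : l ∈ full := hsub l List.mem_cons_self
      by_cases hm : PySem.Str.isIn "uber receives" l = true
      · obtain ⟨k, hk⟩ := Option.isSome_iff_exists.mp
          ((PySem.List.index?_isSome_iff full l).mpr hmem)
        simp only [pvLoopA, pvF, hm, if_true, hk, Option.map_some]
        exact pvLoopA_some full ls k
      · simp only [pvLoopA, pvF, hm, if_false, Bool.false_eq_true]
        exact ih (fun x hx => hsub x (List.mem_cons_of_mem _ hx))

-- B's reverse fold, seen as a foldr, maintains (first total, spec value)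
theorem pvFoldr_inv (rest : List String) :
    rest.foldr (fun l st => pvStep st l) (none, none) = (pvScanTotal rest, pvF rest) := by
  induction rest with
  | nil => rfl
  | cons l ls ih => rw [List.foldr_cons, ih]; simp only [pvStep, pvScanTotal, pvF]

theorem alt_eq_pvF (content : List String) : try_order_u_alt content = pvF content := by
  unfold try_order_u_alt
  have : (content.reverse.foldl
      (fun (st : Option String × Option String) l =>
        let result := if PySem.Str.isIn "uber receives" l then st.1 else st.2
        let ans := if PySem.Str.isIn "total" l then some (pvExtractTotal l) else st.1
        (ans, result)) (none, none))
      = content.foldr (fun l st => pvStep st l) (none, none) := by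
    rw [List.foldl_reverse]; rfl
  rw [this, pvFoldr_inv]

-- ===== VERDICT (by name: the statement is the Claim_ definition above) =====
theorem try_order_u_spec : Claim_equal_try_order_u := by
  intro content _
  unfold Spec_try_order_u try_order_u
  rw [alt_eq_pvF, pvLoopA_none content content (fun _ h => h)]
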